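-- pv_equiv track=rewrite | github.com/rbb-dev/Open-WebUI-OpenRouter-pipe | open_webui_openrouter_pipe/plugins/pipe_stats/formatters.py | resolve_model_name
-- ===== SOURCE A (Python) =====
-- def resolve_model_name(model_id: str, name_map: dict[str, str]) -> str:
--     """Resolve a model ID to its display name, falling back to the raw ID.
--
--     DB stores model IDs in OWUI's prefixed format: ``{pipe_id}.{author}.{model}``.
--     The name map contains keys like ``author.model`` (norm_id) and
--     ``author/model`` (original_id). We try progressively stripping prefixes
--     until we find a match.
--     """
--     if not model_id or model_id == "unknown":
--         return "Unknown"
--     # Direct match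
--     name = name_map.get(model_id)
--     if name:
--         return name
--     # Strip known pipe prefixes (e.g. "open_webui_openrouter_pipe.openai.gpt-5.2")
--     # by progressively removing the first dot-segment until we match.
--     candidate = model_id
--     while "." in candidate:
--         candidate = candidate.split(".", 1)[1]
--         name = name_map.get(candidate)
--         if name:
--             return name
--         # Also try slash form (author/model)
--         slash_form = candidate.replace(".", "/", 1)
--         name = name_map.get(slash_form)
--         if name:
--             return name
--     return model_id
-- ===== SOURCE B (Python) =====
-- def _candidates(segs):
--     """Candidate keys from the dot-segments: for each proper suffix, its
--     dotted join followed by the first-dot-to-slash variant."""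
--     if len(segs) <= 1:
--         return []
--     tail = ".".join(segs[1:])
--     return [tail, tail.replace(".", "/", 1)] + _candidates(segs[1:])
--
--
-- def resolve_model_name(model_id: str, name_map: dict[str, str]) -> str:
--     """Resolve a model ID to its display name, falling back to the raw ID."""
--     if not model_id or model_id == "unknown":
--         return "Unknown"
--     for cand in [model_id] + _candidates(model_id.split(".")):
--         name = name_map.get(cand)
--         if name:
--             return name
--     return model_id
-- ===== Notes on version B (the rewrite author's own statement) =====
-- stated objective: alternative
-- what changed: Candidate-key generation (structural recursion over the dot-segment list, joining suffixes) is separated from a single flat first-truthy-lookup pass, replacing A's interleaved while loop that mutates the candidate string in place.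
import Mathlib
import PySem

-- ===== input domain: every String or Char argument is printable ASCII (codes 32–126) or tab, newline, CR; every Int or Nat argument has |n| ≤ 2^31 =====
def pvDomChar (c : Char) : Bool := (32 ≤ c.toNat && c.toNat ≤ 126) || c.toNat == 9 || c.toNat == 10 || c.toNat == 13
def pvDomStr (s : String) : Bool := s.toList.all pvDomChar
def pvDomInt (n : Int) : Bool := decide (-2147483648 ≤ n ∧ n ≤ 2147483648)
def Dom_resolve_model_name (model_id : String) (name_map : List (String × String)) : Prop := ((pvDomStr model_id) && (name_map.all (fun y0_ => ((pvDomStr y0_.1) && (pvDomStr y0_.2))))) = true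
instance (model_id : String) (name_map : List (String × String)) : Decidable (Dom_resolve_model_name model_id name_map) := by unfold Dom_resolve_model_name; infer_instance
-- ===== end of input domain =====

-- B separates candidate-key generation (recursion over the dot-segments) from one flat
-- first-truthy-lookup pass, replacing A's interleaved while loop mutating the candidate string.

-- ===== PORT A =====
-- `name_map.get(k)` on the association list (dict, insertion order): first match.
def pvGet (nm : List (String × String)) (k : List Char) : Option String :=
  match nm with
  | [] => none
  | (a, b) :: rest => if a.toList = k then some b else pvGet rest k

-- `name = …; if name:` — keep `name` only if it is non-None and non-empty (truthy).
def pvTruthy (o : Option String) : Option String :=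
  match o with
  | some v => if v.toList = [] then none else some v
  | none => none

-- `candidate.split(".", 1)[1]` for a candidate containing '.': hand port, exact for the
-- single-character separator (drops everything up to and including the first '.').
def pvDropSeg : List Char → List Char
  | [] => []
  | c :: r => if c = '.' then r else pvDropSeg r

-- `s.replace(".", "/", 1)`: hand port, exact (replaces the first '.', if any, by '/').
def pvSlash1 : List Char → List Char
  | [] => []
  | c :: r => if c = '.' then '/' :: r else c :: pvSlash1 r

theorem pvDropSeg_length_lt (l : List Char) (h : '.' ∈ l) :
    (pvDropSeg l).length < l.length := by
  induction l with
  | nil => cases h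
  | cons c r ih =>
    by_cases hc : c = '.'
    · simp [pvDropSeg, hc]
    · have hr : '.' ∈ r := by
        rcases List.mem_cons.mp h with h' | h'
        · exact absurd h'.symm hc
        · exact h'
      have := ih hr
      simp [pvDropSeg, hc]
      omega

-- A's while loop; `none` means it fell through (A then returns model_id).
def pvLoopA (nm : List (String × String)) (cand : List Char) : Option String :=
  if h : '.' ∈ cand then -- '.' in candidate
    let cand' := pvDropSeg cand
    match pvTruthy (pvGet nm cand') with
    | some n => some n
    | none =>
      match pvTruthy (pvGet nm (pvSlash1 cand')) with
      | some n => some n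
      | none => pvLoopA nm cand'
  else none
termination_by cand.length
decreasing_by exact pvDropSeg_length_lt cand h

def resolve_model_name (model_id : String) (name_map : List (String × String)) : String :=
  if model_id = "" || model_id = "unknown" then "Unknown"
  else
    match pvTruthy (pvGet name_map model_id.toList) with
    | some n => n
    | none =>
      match pvLoopA name_map model_id.toList with
      | some n => n
      | none => model_id

-- ===== PORT B =====
-- `_candidates(segs)`: recursion on the segment list; `".".join(segs[1:])` is
-- `['.'].intercalate` of the tail, the slash variant is `pvSlash1`.
def pvCandidates : List (List Char) → List (List Char)
  | [] => []
  | [_] => []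
  | _ :: s :: rest =>
    let tail := ['.'].intercalate (s :: rest)
    tail :: pvSlash1 tail :: pvCandidates (s :: rest)

-- the flat pass: first candidate whose looked-up name is truthy.
def pvScan (nm : List (String × String)) : List (List Char) → Option String
  | [] => none
  | c :: rest =>
    match pvTruthy (pvGet nm c) with
    | some n => some n
    | none => pvScan nm rest

-- `model_id.split(".")` with the single-character separator is `List.splitOn '.'`.
def resolve_model_name_alt (model_id : String) (name_map : List (String × String)) : String :=
  if model_id = "" || model_id = "unknown" then "Unknown"
  else
    match pvScan name_map (model_id.toList :: pvCandidates (model_id.toList.splitOn '.')) with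
    | some n => n
    | none => model_id

-- ===== PRECONDITION & SPEC =====
def Spec_resolve_model_name (model_id : String) (name_map : List (String × String)) (out : String) : Prop := out = resolve_model_name_alt model_id name_map
instance (model_id : String) (name_map : List (String × String)) (out : String) : Decidable (Spec_resolve_model_name model_id name_map out) := by unfold Spec_resolve_model_name; infer_instance

-- ===== CLAIM (what is proved, stated in full; the proofs are below) =====
def Claim_equal_resolve_model_name : Prop := ∀ (model_id : String) (name_map : List (String × String)), Dom_resolve_model_name model_id name_map → Spec_resolve_model_name model_id name_map (resolve_model_name model_id name_map)

-- ===== LEMMAS AND PROOFS =====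

theorem splitOn_no_dot (l : List Char) (h : '.' ∉ l) : l.splitOn '.' = [l] := by
  unfold List.splitOn
  apply List.splitOnP_eq_single
  intro x hx
  simp only [beq_iff_eq]
  intro hxe
  exact h (hxe ▸ hx)

theorem splitOn_dot (l : List Char) (h : '.' ∈ l) :
    ∃ s0, l.splitOn '.' = s0 :: (pvDropSeg l).splitOn '.' := by
  induction l with
  | nil => cases h
  | cons c r ih =>
    by_cases hc : c = '.'
    · refine ⟨[], ?_⟩
      subst hc
      simp [List.splitOn, List.splitOnP_cons, pvDropSeg]
    · have hr : '.' ∈ r := by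
        rcases List.mem_cons.mp h with h' | h'
        · exact absurd h'.symm hc
        · exact h'
      obtain ⟨s0, hs⟩ := ih hr
      refine ⟨c :: s0, ?_⟩
      unfold List.splitOn at hs ⊢
      rw [List.splitOnP_cons]
      simp only [beq_iff_eq, hc, if_false]
      rw [hs]
      simp [pvDropSeg, hc]

theorem cands_splitOn (l : List Char) :
    pvCandidates (l.splitOn '.') =
      if '.' ∈ l then
        pvDropSeg l :: pvSlash1 (pvDropSeg l) :: pvCandidates ((pvDropSeg l).splitOn '.')
      else [] := by
  by_cases h : '.' ∈ l
  · obtain ⟨s0, hs⟩ := splitOn_dot l h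
    have hne : (pvDropSeg l).splitOn '.' ≠ [] := by
      unfold List.splitOn; exact List.splitOnP_ne_nil _ _
    obtain ⟨t, ts, ht⟩ := List.exists_cons_of_ne_nil hne
    have hj : ['.'].intercalate (t :: ts) = pvDropSeg l := by
      rw [← ht]; exact List.intercalate_splitOn (pvDropSeg l) '.'
    rw [hs, ht]
    simp only [pvCandidates, hj, h, if_true]
  · rw [splitOn_no_dot l h]
    simp [pvCandidates, h]

theorem loop_eq_scan (n : Nat) : ∀ (l : List Char), l.length ≤ n → ∀ nm,
    pvLoopA nm l = pvScan nm (pvCandidates (l.splitOn '.')) := by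
  induction n with
  | zero =>
    intro l hl nm
    have : l = [] := List.eq_nil_of_length_eq_zero (Nat.le_zero.mp hl)
    subst this
    rw [cands_splitOn]
    simp [pvLoopA, pvScan]
  | succ n ih =>
    intro l hl nm
    rw [cands_splitOn]
    by_cases h : '.' ∈ l
    · rw [pvLoopA]
      simp only [h, if_true, dif_pos]
      have hlt := pvDropSeg_length_lt l h
      have hrec := ih (pvDropSeg l) (by omega) nm
      simp only [pvScan]
      cases pvTruthy (pvGet nm (pvDropSeg l)) with
      | some v => rfl
      | none =>
        cases pvTruthy (pvGet nm (pvSlash1 (pvDropSeg l))) with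
        | some v => rfl
        | none => exact hrec
    · rw [pvLoopA]
      simp [h, pvScan]

-- ===== VERDICT (by name: the statement is the Claim_ definition above) =====
theorem resolve_model_name_spec : Claim_equal_resolve_model_name := by
  intro model_id name_map _
  unfold Spec_resolve_model_name resolve_model_name resolve_model_name_alt
  by_cases hg : model_id = "" || model_id = "unknown"
  · simp [hg]
  · simp only [hg]
    rw [pvScan]
    rw [loop_eq_scan model_id.toList.length model_id.toList (le_refl _) name_map]
    cases pvTruthy (pvGet name_map model_id.toList) with
    | some v => rfl
    | none => rfl
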